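-- pv_equiv track=rewrite | github.com/alimehdi32/Uni_Lab | Semester4/Machine-Learning-Lab/knn.py | manual_encode
-- ===== SOURCE A (Python) =====
-- def manual_encode(column):
--     unique_vals = []
--
--     for val in column:
--         if val not in unique_vals:
--             unique_vals.append(val)
--
--     mapping = {}
--     for i in range(len(unique_vals)):
--         mapping[unique_vals[i]] = i
--
--     encoded_column = []
--     for val in column:
--         encoded_column.append(mapping[val])
--
--     return encoded_column, mapping
-- ===== SOURCE B (Python) =====
-- def manual_encode(column):
--     mapping = {}
--     encoded_column = []
--     for val in column:
--         if val not in mapping: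
--             mapping[val] = len(mapping)
--         encoded_column.append(mapping[val])
--     return encoded_column, mapping
-- ===== Notes on version B (the rewrite author's own statement) =====
-- stated objective: faster
-- what changed: Replaces A's three passes (build unique list with O(n) membership scans, build mapping from it, re-scan column) by one pass that keeps a dict and derives each new code from the dict's current size, turning the quadratic 'val not in unique_vals' list scans into O(1) hash lookups.
import Mathlib
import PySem

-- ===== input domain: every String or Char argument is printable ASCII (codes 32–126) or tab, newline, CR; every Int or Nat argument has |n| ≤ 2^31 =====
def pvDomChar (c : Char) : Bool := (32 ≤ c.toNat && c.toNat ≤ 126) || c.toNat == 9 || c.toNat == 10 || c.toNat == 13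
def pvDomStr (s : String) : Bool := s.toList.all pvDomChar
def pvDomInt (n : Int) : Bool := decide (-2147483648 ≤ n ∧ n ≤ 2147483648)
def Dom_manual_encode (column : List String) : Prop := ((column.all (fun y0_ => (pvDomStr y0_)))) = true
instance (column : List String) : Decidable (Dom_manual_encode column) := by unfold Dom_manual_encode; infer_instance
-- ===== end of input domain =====

-- B fuses A's three passes (unique list with linear membership scans, index map, re-encode pass)
-- into one dict-driven pass deriving each new code from the dict's current size; objective: faster.

-- ===== PORT A =====
-- getD stands in for Python's u[i] / mapping[val]: the defaults are never reached (i in range; every val of column is a key).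
def manual_encode (column : List String) : List Int × (List (String × Int)) :=
  let unique_vals := column.foldl (fun acc val => if val ∈ acc then acc else acc ++ [val]) []
  let mapping := (PySem.List.pyRange 0 (unique_vals.length : Int) 1).foldl
      (fun d i => d.insert (PySem.List.pyGetD unique_vals i "") i) PySem.Dict.empty
  let encoded_column := column.foldl (fun acc val => acc ++ [mapping.getD val 0]) []
  (encoded_column, mapping.items)

-- ===== PORT B =====
def manual_encode_alt (column : List String) : List Int × (List (String × Int)) :=
  let st := column.foldl
    (fun (st : List Int × PySem.Dict String Int) val =>
      let mapping := if st.2.contains val then st.2 else st.2.insert val (st.2.size : Int)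
      (st.1 ++ [mapping.getD val 0], mapping))
    ([], PySem.Dict.empty)
  (st.1, st.2.items)

-- ===== PRECONDITION & SPEC =====
def Spec_manual_encode (column : List String) (out : List Int × (List (String × Int))) : Prop := out = manual_encode_alt column
instance (column : List String) (out : List Int × (List (String × Int))) : Decidable (Spec_manual_encode column out) := by unfold Spec_manual_encode; infer_instance

-- ===== CLAIM (what is proved, stated in full; the proofs are below) =====
def Claim_equal_manual_encode : Prop := ∀ (column : List String), Dom_manual_encode column → Spec_manual_encode column (manual_encode column)

-- ===== LEMMAS AND PROOFS =====

-- reference dict: the distinct values u paired with their first-appearance indices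
def dictOf (u : List String) : PySem.Dict String Int :=
  PySem.Dict.mk (u.zipIdx.map (fun p => (p.1, (p.2 : Int))))

-- reference encoding both ports are proved equal to
def encOf (p : List String) : List Int :=
  p.map (fun v => (((PySem.Set.ofList p).idxOf v : Nat) : Int))

theorem keys_dictOf (u : List String) : (dictOf u).keys = u := by
  simp only [dictOf, PySem.Dict.keys, List.map_map]
  exact List.zipIdx_map_fst 0 u

theorem size_dictOf (u : List String) : (dictOf u).size = u.length := by
  simp [dictOf, PySem.Dict.size]

theorem contains_dictOf (u : List String) (v : String) :
    (dictOf u).contains v = decide (v ∈ u) := by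
  rw [PySem.Dict.contains_eq_decide_mem_keys, keys_dictOf]

theorem getD_dictOf (u : List String) (v : String) (hnd : u.Nodup) (hv : v ∈ u) :
    (dictOf u).getD v 0 = ((u.idxOf v : Nat) : Int) := by
  apply PySem.Dict.getD_of_mem_items
  · refine List.mem_map.mpr ⟨(v, u.idxOf v), ?_, rfl⟩
    rw [List.mk_mem_zipIdx_iff_getElem?]
    exact List.getElem?_idxOf hv
  · rw [keys_dictOf]; exact hnd

theorem dictOf_append (u : List String) (v : String) (h : v ∉ u) :
    (dictOf u).insert v ((u.length : Nat) : Int) = dictOf (u ++ [v]) := by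
  apply PySem.Dict.ext
  rw [PySem.Dict.items_insert_of_not_contains]
  · simp [dictOf, List.zipIdx_append]
  · rw [contains_dictOf]; simpa using h

theorem foldl_append_map {α β : Type} (l : List α) (f : α → β) (acc : List β) :
    l.foldl (fun a v => a ++ [f v]) acc = acc ++ l.map f := by
  induction l generalizing acc with
  | nil => simp
  | cons x xs ih => simp [List.foldl_cons, ih]

theorem uniq_eq (column : List String) :
    column.foldl (fun acc val => if val ∈ acc then acc else acc ++ [val]) []
      = PySem.Set.ofList column := by
  have h : (fun (acc : List String) val => if val ∈ acc then acc else acc ++ [val])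
      = PySem.Set.add := by
    funext s x; rw [PySem.Set.add_eq_ite]
  rw [h, PySem.Set.ofList_eq_foldl]

theorem map_getD_range (u : List String) :
    (List.range u.length).map (fun k => u.getD k "") = u := by
  apply List.ext_getElem
  · simp
  · intro k h1 h2
    simp [List.getD_eq_getElem?_getD, List.getElem?_eq_getElem h2]

theorem mapping_eq (u : List String) (hnd : u.Nodup) :
    (PySem.List.pyRange 0 (u.length : Int) 1).foldl
      (fun d i => d.insert (PySem.List.pyGetD u i "") i) PySem.Dict.empty = dictOf u := by
  rw [PySem.List.pyRange_zero_nat, List.foldl_map]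
  simp only [PySem.List.pyGetD_natCast]
  apply PySem.Dict.ext
  rw [PySem.Dict.items_foldl_insert_fresh]
  · simp only [dictOf, PySem.Dict.empty, List.nil_append]
    apply List.ext_getElem
    · simp
    · intro k h1 h2
      simp at h1 h2 ⊢
      simp [List.getElem?_eq_getElem h1]
  · intro a _; exact PySem.Dict.contains_empty _
  · rw [map_getD_range]; exact hnd

theorem a_eq_ref (column : List String) :
    manual_encode column = (encOf column, (dictOf (PySem.Set.ofList column)).items) := by
  simp only [manual_encode]
  rw [uniq_eq, mapping_eq _ (PySem.Set.nodup_ofList column), foldl_append_map]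
  simp only [List.nil_append, encOf]
  refine Prod.ext ?_ rfl
  simp only
  apply List.map_congr_left
  intro v hv
  exact getD_dictOf _ _ (PySem.Set.nodup_ofList column) ((PySem.Set.mem_ofList _ _).mpr hv)

theorem b_loop (l : List String) : ∀ (p : List String),
    l.foldl
      (fun (st : List Int × PySem.Dict String Int) val =>
        let mapping := if st.2.contains val then st.2 else st.2.insert val (st.2.size : Int)
        (st.1 ++ [mapping.getD val 0], mapping))
      (encOf p, dictOf (PySem.Set.ofList p))
    = (encOf (p ++ l), dictOf (PySem.Set.ofList (p ++ l))) := by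
  induction l with
  | nil => intro p; simp
  | cons v l ih =>
    intro p
    have hnd : (PySem.Set.ofList p).Nodup := PySem.Set.nodup_ofList p
    have hstep :
        (let mapping := if (dictOf (PySem.Set.ofList p)).contains v
            then dictOf (PySem.Set.ofList p)
            else (dictOf (PySem.Set.ofList p)).insert v ((dictOf (PySem.Set.ofList p)).size : Int)
         ((encOf p ++ [mapping.getD v 0], mapping) : List Int × PySem.Dict String Int))
        = (encOf (p ++ [v]), dictOf (PySem.Set.ofList (p ++ [v]))) := by
      rw [contains_dictOf, size_dictOf]
      by_cases hv : v ∈ PySem.Set.ofList p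
      · have hofl : PySem.Set.ofList (p ++ [v]) = PySem.Set.ofList p := by
          rw [PySem.Set.ofList_append_singleton, PySem.Set.add_of_mem hv]
        simp only [hv, decide_true, if_true]
        refine Prod.ext ?_ (by simp [hofl])
        simp only [encOf, hofl, List.map_append, List.map_singleton]
        rw [getD_dictOf _ _ hnd hv]
      · have hofl : PySem.Set.ofList (p ++ [v]) = PySem.Set.ofList p ++ [v] := by
          rw [PySem.Set.ofList_append_singleton, PySem.Set.add_of_not_mem hv]
        have hnd' : (PySem.Set.ofList p ++ [v]).Nodup := by
          rw [← hofl]; exact PySem.Set.nodup_ofList _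
        simp only [hv, decide_false, Bool.false_eq_true, if_false]
        rw [dictOf_append _ _ hv]
        refine Prod.ext ?_ (by simp [hofl])
        simp only [encOf, hofl, List.map_append, List.map_singleton]
        congr 1
        · apply List.map_congr_left
          intro w hw
          have hw' : w ∈ PySem.Set.ofList p := (PySem.Set.mem_ofList _ _).mpr hw
          rw [List.idxOf_append_of_mem hw']
        · rw [getD_dictOf _ v hnd' (by simp), List.idxOf_append_of_notMem hv]
    rw [List.foldl_cons, hstep, ih (p ++ [v])]
    simp

theorem b_eq_ref (column : List String) :
    manual_encode_alt column = (encOf column, (dictOf (PySem.Set.ofList column)).items) := by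
  simp only [manual_encode_alt]
  have h0 : (([], PySem.Dict.empty) : List Int × PySem.Dict String Int)
      = (encOf [], dictOf (PySem.Set.ofList [])) := rfl
  rw [h0, b_loop column []]
  simp

-- ===== VERDICT (by name: the statement is the Claim_ definition above) =====
theorem manual_encode_spec : Claim_equal_manual_encode := by
  intro column _
  unfold Spec_manual_encode
  rw [a_eq_ref, b_eq_ref]
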